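-- pv_equiv track=rewrite | github.com/john-friedman/datamule-data | code/financial-security-identifiers/utils.py | deduplicate_and_merge
-- ===== SOURCE A (Python) =====
-- from collections import defaultdict
--
-- class UnionFind:
--     """Union-Find data structure with path compression and union by rank."""
--     def __init__(self, n):
--         self.parent = list(range(n))
--         self.rank = [0] * n
--
--     def find(self, x):
--         """Find with path compression."""
--         if self.parent[x] != x:
--             self.parent[x] = self.find(self.parent[x])
--         return self.parent[x]
--
--     def union(self, x, y):
--         """Union by rank."""
--         px, py = self.find(x), self.find(y)
--         if px == py:
--             return False
--         if self.rank[px] < self.rank[py]: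
--             px, py = py, px
--         self.parent[py] = px
--         if self.rank[px] == self.rank[py]:
--             self.rank[px] += 1
--         return True
--
--     def get_groups(self):
--         """Return dictionary mapping root -> list of elements in that group."""
--         groups = defaultdict(list)
--         for i in range(len(self.parent)):
--             groups[self.find(i)].append(i)
--         return groups
--
-- def deduplicate_and_merge(rows):
--     """
--     Optimized deduplication using Union-Find and hash indices.
--     Time complexity: O(n × α(n)) ≈ O(n)
--
--     Args:
--         rows: List of validated dictionaries with financial identifiers
--
--     Returns:
--         List of unique, merged dictionaries with maximum information per security
--     """
--     if not rows:
--         return []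
--
--     n = len(rows)
--     uf = UnionFind(n)
--
--     # Build reverse indices for O(1) lookup
--     indices = {
--         'cusip': defaultdict(list),
--         'isin': defaultdict(list),
--         'figi': defaultdict(list)
--     }
--
--     # Single pass to build indices
--     for i, row in enumerate(rows):
--         for identifier_type in ['cusip', 'isin', 'figi']:
--             if identifier_type in row and row[identifier_type]:
--                 value = row[identifier_type]
--                 indices[identifier_type][value].append(i)
--
--     # Connect components using Union-Find
--     for identifier_type in ['cusip', 'isin', 'figi']:
--         for value, row_indices in indices[identifier_type].items():
--             if len(row_indices) > 1:
--                 # Union all rows with this identifier value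
--                 first = row_indices[0]
--                 for idx in row_indices[1:]:
--                     uf.union(first, idx)
--
--     # Get connected components
--     groups = uf.get_groups()
--
--     # Merge rows within each group
--     final_rows = []
--     for root, group_indices in groups.items():
--         # Merge all identifiers from rows in this group
--         merged = {}
--
--         for idx in group_indices:
--             row = rows[idx]
--             for identifier in ['cusip', 'isin', 'figi']:
--                 if identifier in row and row[identifier]:
--                     # Keep the first non-null value we find for each identifier
--                     if identifier not in merged:
--                         merged[identifier] = row[identifier]
--
--         # Only include if we have at least 2 identifiers
--         if sum(1 for k in ['cusip', 'isin', 'figi'] if k in merged) >= 2: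
--             final_rows.append(merged)
--
--     return final_rows
-- ===== SOURCE B (Python) =====
-- def deduplicate_and_merge(rows):
--     n = len(rows)
--     # connected-component labels via a flat label array with whole-array relabeling
--     label = list(range(n))
--     for key in ('cusip', 'isin', 'figi'):
--         buckets = {}
--         for i, row in enumerate(rows):
--             v = row.get(key)
--             if v:
--                 buckets.setdefault(v, []).append(i)
--         for members in buckets.values():
--             first = members[0]
--             for idx in members[1:]:
--                 a, b = label[first], label[idx]
--                 if a != b:
--                     label = [a if x == b else x for x in label]
--     comps = {}
--     for i in range(n):
--         comps.setdefault(label[i], []).append(i)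
--     out = []
--     for group in comps.values():
--         merged = {}
--         for idx in group:
--             row = rows[idx]
--             for key in ('cusip', 'isin', 'figi'):
--                 v = row.get(key)
--                 if v and key not in merged:
--                     merged[key] = v
--         if len(merged) >= 2:
--             out.append(merged)
--     return out
-- ===== Notes on version B (the rewrite author's own statement) =====
-- stated objective: simpler
-- what changed: Replaces the UnionFind class (parent/rank arrays, recursive find with path compression, union by rank) and the nested per-type defaultdict indices by a flat component-label array updated by whole-array relabeling per bucket, with one plain bucket dict per identifier type; grouping, merging and the >=2-identifier filter are then done off the label array.
import Mathlib
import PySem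

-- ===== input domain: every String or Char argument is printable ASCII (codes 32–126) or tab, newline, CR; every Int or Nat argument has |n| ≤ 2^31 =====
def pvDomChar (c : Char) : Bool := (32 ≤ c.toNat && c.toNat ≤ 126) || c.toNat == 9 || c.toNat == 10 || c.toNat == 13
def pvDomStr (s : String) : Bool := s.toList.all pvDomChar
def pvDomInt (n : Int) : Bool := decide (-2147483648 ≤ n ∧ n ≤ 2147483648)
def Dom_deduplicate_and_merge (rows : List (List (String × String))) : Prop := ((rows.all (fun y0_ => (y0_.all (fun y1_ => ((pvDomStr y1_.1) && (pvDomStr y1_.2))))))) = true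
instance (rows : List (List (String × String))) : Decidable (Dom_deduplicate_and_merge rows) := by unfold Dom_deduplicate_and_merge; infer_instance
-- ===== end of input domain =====

-- B replaces A's Union-Find (parent/rank arrays, path compression) by a flat label array with
-- whole-array relabeling; objective: simpler (no UnionFind class), not faster.
-- Equivalence proved on all inputs (both functions are total).

-- ===== PORT A =====

-- both A and B iterate over the literal key tuple ('cusip', 'isin', 'figi')
def pvKeys : List String := ["cusip", "isin", "figi"]

-- UnionFind.find with path compression; fuel bounds the recursion depth (chains are acyclic and
-- shorter than the fuel at every call site, so this is exact on all reachable states)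
def ufFind (fuel : Nat) (p : List Nat) (x : Nat) : Nat × List Nat :=
  match fuel with
  | 0 => (x, p)
  | fuel + 1 =>
    let px := p.getD x x
    if px ≠ x then
      let r := ufFind fuel p px
      (r.1, r.2.set x r.1)
    else (px, p)

-- UnionFind.union by rank; state = (parent, rank)
def ufUnion (st : List Nat × List Nat) (x y : Nat) : List Nat × List Nat :=
  let f1 := ufFind (st.1.length + 1) st.1 x
  let f2 := ufFind (f1.2.length + 1) f1.2 y
  let px := f1.1
  let py := f2.1
  let p2 := f2.2
  let rk := st.2
  if px = py then (p2, rk)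
  else
    let pq := if rk.getD px 0 < rk.getD py 0 then (py, px) else (px, py)
    let p3 := p2.set pq.2 pq.1
    let rk' := if rk.getD pq.1 0 = rk.getD pq.2 0 then rk.set pq.1 (rk.getD pq.1 0 + 1) else rk
    (p3, rk')

-- UnionFind.get_groups: groups[self.find(i)].append(i) for i in range(n)
def ufGetGroups (p : List Nat) : PySem.Dict Nat (List Nat) × List Nat :=
  (List.range p.length).foldl
    (fun st i =>
      let f := ufFind (st.2.length + 1) st.2 i
      (st.1.insert f.1 (st.1.getD f.1 [] ++ [i]), f.2))
    (PySem.Dict.mk [], p)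

-- single pass building the reverse indices (enumerate(rows); inner loop over the three key names)
def aIndexStep (d : PySem.Dict String (PySem.Dict String (List Nat)))
    (row : List (String × String)) (i : Nat) : PySem.Dict String (PySem.Dict String (List Nat)) :=
  pvKeys.foldl
    (fun d t =>
      let rowd := PySem.Dict.mk row
      if rowd.contains t ∧ rowd.getD t "" ≠ "" then
        let value := rowd.getD t ""
        let inner := d.getD t (PySem.Dict.mk [])
        d.insert t (inner.insert value (inner.getD value [] ++ [i]))
      else d) d

def aBuildIndices (rows : List (List (String × String))) :
    PySem.Dict String (PySem.Dict String (List Nat)) :=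
  rows.zipIdx.foldl (fun d ri => aIndexStep d ri.1 ri.2)
    (((PySem.Dict.mk []).insert "cusip" (PySem.Dict.mk [])).insert "isin" (PySem.Dict.mk [])
      |>.insert "figi" (PySem.Dict.mk []))

-- connect components: for each identifier type, for each (value, row_indices), union first with the rest
def aConnect (indices : PySem.Dict String (PySem.Dict String (List Nat)))
    (st0 : List Nat × List Nat) : List Nat × List Nat :=
  pvKeys.foldl
    (fun st t =>
      ((indices.getD t (PySem.Dict.mk [])).items).foldl
        (fun st vr =>
          let ris := vr.2
          if 1 < ris.length then
            let first := ris.headD 0      -- ris[0]; every bucket list is nonempty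
            (ris.drop 1).foldl (fun st idx => ufUnion st first idx) st
          else st) st) st0

-- merge all identifiers from the rows of one group, first non-null value wins
def aMergeGroup (rows : List (List (String × String))) (gis : List Nat) :
    PySem.Dict String String :=
  gis.foldl
    (fun merged idx =>
      let rowd := PySem.Dict.mk (rows.getD idx [])   -- rows[idx]; idx < len(rows) on every group
      pvKeys.foldl
        (fun merged k =>
          if rowd.contains k ∧ rowd.getD k "" ≠ "" then
            if merged.contains k then merged else merged.insert k (rowd.getD k "")
          else merged) merged)
    (PySem.Dict.mk [])

def deduplicate_and_merge (rows : List (List (String × String))) :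
    List (List (String × String)) :=
  if rows = [] then []
  else
    let n := rows.length
    let indices := aBuildIndices rows
    let st := aConnect indices (List.range n, List.replicate n 0)
    let groups := (ufGetGroups st.1).1
    groups.items.foldl
      (fun fr g =>
        let merged := aMergeGroup rows g.2
        -- sum(1 for k in [...] if k in merged) counts the keys of merged among the three: countP
        if 2 ≤ pvKeys.countP (fun k => merged.contains k) then fr ++ [merged.items] else fr)
      []

-- ===== PORT B =====

-- buckets for one identifier type: value -> ascending list of row indices
def bBuckets (rows : List (List (String × String))) (k : String) :
    PySem.Dict String (List Nat) :=
  rows.zipIdx.foldl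
    (fun d ri =>
      match (PySem.Dict.mk ri.1).get? k with
      | some v => if v ≠ "" then d.insert v (d.getD v [] ++ [ri.2]) else d
      | none => d)
    (PySem.Dict.mk [])

-- label = [a if x == b else x for x in label]
def bRelabel (label : List Nat) (a b : Nat) : List Nat :=
  label.map (fun x => if x = b then a else x)

-- component labels: per bucket, fold every member into the first member's label class
def bLabelPhase (rows : List (List (String × String))) : List Nat :=
  pvKeys.foldl
    (fun label k =>
      (bBuckets rows k).values.foldl
        (fun label members =>
          let first := members.headD 0   -- members[0]; bucket lists are nonempty
          (members.drop 1).foldl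
            (fun label idx =>
              let a := label.getD first 0
              let b := label.getD idx 0
              if a ≠ b then bRelabel label a b else label) label) label)
    (List.range rows.length)

-- comps.setdefault(label[i], []).append(i) for i in range(n)
def bComps (label : List Nat) : PySem.Dict Nat (List Nat) :=
  (List.range label.length).foldl
    (fun d i =>
      let l := label.getD i 0
      d.insert l (d.getD l [] ++ [i]))
    (PySem.Dict.mk [])

def bMergeGroup (rows : List (List (String × String))) (gis : List Nat) :
    PySem.Dict String String :=
  gis.foldl
    (fun merged idx =>
      let rowd := PySem.Dict.mk (rows.getD idx [])   -- rows[idx]; idx < len(rows) on every group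
      pvKeys.foldl
        (fun merged k =>
          match rowd.get? k with
          | some v => if v ≠ "" ∧ ¬ merged.contains k then merged.insert k v else merged
          | none => merged) merged)
    (PySem.Dict.mk [])

def deduplicate_and_merge_alt (rows : List (List (String × String))) :
    List (List (String × String)) :=
  let label := bLabelPhase rows
  (bComps label).values.foldl
    (fun out g =>
      let merged := bMergeGroup rows g
      if 2 ≤ merged.items.length then out ++ [merged.items] else out)
    []

-- ===== PRECONDITION & SPEC =====
def Spec_deduplicate_and_merge (rows : List (List (String × String))) (out : List (List (String × String))) : Prop := out = deduplicate_and_merge_alt rows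
instance (rows : List (List (String × String))) (out : List (List (String × String))) : Decidable (Spec_deduplicate_and_merge rows out) := by unfold Spec_deduplicate_and_merge; infer_instance

-- ===== CLAIM (what is proved, stated in full; the proofs are below) =====
def Claim_equal_deduplicate_and_merge : Prop := ∀ (rows : List (List (String × String))), Dom_deduplicate_and_merge rows → Spec_deduplicate_and_merge rows (deduplicate_and_merge rows)

-- ===== LEMMAS AND PROOFS =====
-- UF proof layer
def pvIter (p : List Nat) : Nat → Nat → Nat
  | 0, x => x
  | k+1, x => pvIter p k (p.getD x x)

abbrev pvIsRoot (p : List Nat) (x : Nat) : Prop := p.getD x x = x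

def pvReach (p : List Nat) (x : Nat) : Prop := ∃ k, pvIsRoot p (pvIter p k x)

def pvGood (n : Nat) (p : List Nat) : Prop :=
  p.length = n ∧ (∀ x, x < n → p.getD x x < n) ∧ ∀ x, pvReach p x

def pvRoot (p : List Nat) (x : Nat) : Nat := pvIter p p.length x

theorem pvIter_add (p : List Nat) (a b x : Nat) :
    pvIter p (a + b) x = pvIter p b (pvIter p a x) := by
  induction a generalizing x with
  | zero => simp [pvIter]
  | succ a ih => rw [Nat.succ_add]; simp only [pvIter]; exact ih _

theorem pvIter_root (p : List Nat) (k : Nat) {r : Nat} (h : pvIsRoot p r) :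
    pvIter p k r = r := by
  induction k with
  | zero => rfl
  | succ k ih => simp only [pvIter]; rw [show p.getD r r = r from h]; exact ih

theorem pvIsRoot_of_ge {p : List Nat} {x : Nat} (h : p.length ≤ x) : pvIsRoot p x := by
  simp [pvIsRoot, List.getD_eq_getElem?_getD, List.getElem?_eq_none (by omega : p.length ≤ x)]

theorem pvReach_of_ge {p : List Nat} {x : Nat} (h : p.length ≤ x) : pvReach p x :=
  ⟨0, pvIsRoot_of_ge h⟩

-- chain stays below n
theorem pvIter_lt {n : Nat} {p : List Nat} (hg : pvGood n p) {x : Nat} (hx : x < n) (k : Nat) :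
    pvIter p k x < n := by
  induction k generalizing x with
  | zero => exact hx
  | succ k ih => exact ih (hg.2.1 x hx)

-- the minimal fixing time
noncomputable def pvDm (p : List Nat) (x : Nat) (h : pvReach p x) : Nat := Nat.find h

theorem pvDm_spec (p : List Nat) (x : Nat) (h : pvReach p x) :
    pvIsRoot p (pvIter p (pvDm p x h) x) := Nat.find_spec h

theorem pvDm_min (p : List Nat) (x : Nat) (h : pvReach p x) {m : Nat} (hm : m < pvDm p x h) :
    ¬ pvIsRoot p (pvIter p m x) := Nat.find_min h hm

-- once at dm, stable ever after
theorem pvIter_stable (p : List Nat) (x : Nat) (h : pvReach p x) {k : Nat}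
    (hk : pvDm p x h ≤ k) : pvIter p k x = pvIter p (pvDm p x h) x := by
  rcases Nat.exists_eq_add_of_le hk with ⟨t, rfl⟩
  rw [pvIter_add]; exact pvIter_root _ _ (pvDm_spec p x h)

-- reaching a root within length steps names pvRoot
theorem pvRoot_eq_of_reach {p : List Nat} {x r k : Nat} (hk : k ≤ p.length)
    (hroot : pvIsRoot p (pvIter p k x)) (hval : pvIter p k x = r) : pvRoot p x = r := by
  subst hval
  have : p.length = k + (p.length - k) := by omega
  rw [pvRoot, this, pvIter_add]
  exact pvIter_root _ _ hroot

-- pigeonhole: dm < n for x < n (n = length)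
theorem pvDm_lt {n : Nat} {p : List Nat} (hg : pvGood n p) {x : Nat} (hx : x < n)
    (h : pvReach p x) : pvDm p x h < n := by
  by_contra hge
  push Not at hge
  -- the first dm+1 chain values are pairwise distinct and all < n
  set d := pvDm p x h with hd
  have hinj : ∀ i j, i < j → j ≤ d → pvIter p i x ≠ pvIter p j x := by
    intro i j hij hjd heq
    -- then iter (i + (d - j)) x is a root earlier than d
    have : pvIter p (i + (d - j)) x = pvIter p d x := by
      rw [pvIter_add]
      have : d = j + (d - j) := by omega
      rw [heq, ← pvIter_add, ← this]
    have hroot : pvIsRoot p (pvIter p (i + (d - j)) x) := this ▸ pvDm_spec p x h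
    exact pvDm_min p x h (by omega) hroot
  have hnodup : ((List.range (d + 1)).map (fun i => pvIter p i x)).Nodup := by
    rw [List.nodup_map_iff_inj_on List.nodup_range]
    intro i hi j hj hij
    simp only [List.mem_range] at hi hj
    by_contra hne
    rcases Nat.lt_or_ge i j with hlt | hge2
    · exact hinj i j hlt (by omega) hij
    · exact hinj j i (by omega) (by omega) hij.symm
  have hsub : ((List.range (d + 1)).map (fun i => pvIter p i x)) ⊆ List.range n := by
    intro y hy
    simp only [List.mem_map, List.mem_range] at hy ⊢
    rcases hy with ⟨i, _, rfl⟩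
    exact pvIter_lt hg hx i
  have := (hnodup.subperm hsub).length_le
  simp at this
  omega

theorem pvRoot_isRoot {n : Nat} {p : List Nat} (hg : pvGood n p) (x : Nat) :
    pvIsRoot p (pvRoot p x) := by
  have hlen := hg.1
  rcases Nat.lt_or_ge x n with hx | hx
  · have h := hg.2.2 x
    have hdm := pvDm_lt hg hx h
    rw [pvRoot, pvIter_stable p x h (by omega : pvDm p x h ≤ p.length)]
    exact pvDm_spec p x h
  · have : pvIsRoot p x := pvIsRoot_of_ge (by omega : p.length ≤ x)
    rw [pvRoot, pvIter_root _ _ this]; exact this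

theorem pvRoot_of_isRoot {p : List Nat} {x : Nat} (h : pvIsRoot p x) : pvRoot p x = x :=
  pvIter_root _ _ h

theorem pvRoot_lt {n : Nat} {p : List Nat} (hg : pvGood n p) {x : Nat} (hx : x < n) :
    pvRoot p x < n := pvIter_lt hg hx _

theorem pvRoot_step {n : Nat} {p : List Nat} (hg : pvGood n p) {x : Nat} (hx : x < n) :
    pvRoot p x = pvRoot p (p.getD x x) := by
  have h := hg.2.2 x
  have h' := hg.2.2 (p.getD x x)
  have hlen : p.length = n := hg.1
  have hx' : p.getD x x < n := hg.2.1 x hx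
  -- pvRoot p x = iter n x = iter (n-1) (p x)
  have h1 : pvRoot p x = pvIter p (p.length - 1) (p.getD x x) := by
    rw [pvRoot]
    have : p.length = 1 + (p.length - 1) := by omega
    conv_lhs => rw [this]
    rw [pvIter_add]
    rfl
  have hdm' := pvDm_lt hg hx' h'
  have h2 : pvRoot p (p.getD x x) = pvIter p (pvDm p (p.getD x x) h') (p.getD x x) := by
    rw [pvRoot]; exact pvIter_stable p _ h' (by omega)
  rw [h1, h2]; exact pvIter_stable p _ h' (by omega)
theorem pvGetD_set (p : List Nat) (x v y : Nat) :
    (p.set x v).getD y y = if y = x ∧ x < p.length then v else p.getD y y := by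
  simp only [List.getD_eq_getElem?_getD, List.getElem?_set]
  split_ifs with h1 h2 h3 <;> simp_all <;> omega

theorem pvDm_pos {p : List Nat} {x : Nat} (hnr : ¬ pvIsRoot p x) (hr : pvReach p x) :
    1 ≤ pvDm p x hr := by
  by_contra h
  have h0 : pvDm p x hr = 0 := by omega
  have := pvDm_spec p x hr
  rw [h0] at this
  exact hnr this

theorem pvDm_succ {p : List Nat} {x : Nat} (hnr : ¬ pvIsRoot p x) (hr : pvReach p x)
    (hr' : pvReach p (p.getD x x)) : pvDm p (p.getD x x) hr' ≤ pvDm p x hr - 1 := by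
  apply Nat.find_le
  have h1 := pvDm_pos hnr hr
  have : pvIter p (pvDm p x hr - 1) (p.getD x x) = pvIter p (pvDm p x hr) x := by
    have : pvDm p x hr = (pvDm p x hr - 1) + 1 := by omega
    rw [this]
    rfl
  rw [this]
  exact pvDm_spec p x hr

theorem pvSet_keeps_root {n : Nat} {q : List Nat} (hg : pvGood n q) {x : Nat} (hx : x < n)
    {r : Nat} (hr : pvIsRoot q r) : pvIsRoot (q.set x (pvRoot q x)) r := by
  unfold pvIsRoot
  rw [pvGetD_set]
  split_ifs with h
  · rcases h with ⟨rfl, _⟩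
    exact pvRoot_of_isRoot hr
  · exact hr

theorem pvSet_root_core {n : Nat} {q : List Nat} (hg : pvGood n q) {x : Nat} (hx : x < n) :
    ∀ m y, y < n → ∀ (hr : pvReach q y), pvDm q y hr ≤ m →
      ∃ k, k ≤ pvDm q y hr + 1 ∧ pvIter (q.set x (pvRoot q x)) k y = pvRoot q y ∧
        pvIsRoot (q.set x (pvRoot q x)) (pvRoot q y) := by
  have hlen := hg.1
  intro m
  induction m with
  | zero =>
    intro y hy hr hdm
    -- dm = 0: y is a root
    have hroot : pvIsRoot q y := by
      have := pvDm_spec q y hr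
      rw [Nat.le_zero.mp hdm] at this
      exact this
    exact ⟨0, by omega, (pvRoot_of_isRoot hroot).symm ▸ rfl, by
      rw [pvRoot_of_isRoot hroot]; exact pvSet_keeps_root hg hx hroot⟩
  | succ m ih =>
    intro y hy hr hdm
    by_cases hroot : pvIsRoot q y
    · exact ⟨0, by omega, by rw [pvIter, pvRoot_of_isRoot hroot], by
        rw [pvRoot_of_isRoot hroot]; exact pvSet_keeps_root hg hx hroot⟩
    · by_cases hyx : y = x
      · subst hyx
        refine ⟨1, by omega, ?_, pvSet_keeps_root hg hx (pvRoot_isRoot hg y)⟩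
        show pvIter (q.set y (pvRoot q y)) 0 ((q.set y (pvRoot q y)).getD y y) = pvRoot q y
        rw [pvGetD_set, if_pos ⟨rfl, by omega⟩]
        rfl
      · have hz : q.getD y y < n := hg.2.1 y hy
        have hrz : pvReach q (q.getD y y) := hg.2.2 _
        have hdmz : pvDm q _ hrz ≤ pvDm q y hr - 1 := pvDm_succ hroot hr hrz
        have hpos : 1 ≤ pvDm q y hr := pvDm_pos hroot hr
        obtain ⟨k, hk, hiter, hroot'⟩ := ih (q.getD y y) hz hrz (by omega)
        refine ⟨k + 1, by omega, ?_, ?_⟩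
        · show pvIter (q.set x (pvRoot q x)) k ((q.set x (pvRoot q x)).getD y y) = pvRoot q y
          rw [pvGetD_set, if_neg (by tauto), hiter, ← pvRoot_step hg hy]
        · rw [pvRoot_step hg hy]; exact hroot'

theorem pvSet_root {n : Nat} {q : List Nat} (hg : pvGood n q) {x : Nat} (hx : x < n) :
    pvGood n (q.set x (pvRoot q x)) ∧ ∀ y, pvRoot (q.set x (pvRoot q x)) y = pvRoot q y := by
  have hlen := hg.1
  set q' := q.set x (pvRoot q x) with hq'
  have hlen' : q'.length = n := by rw [hq', List.length_set, hlen]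
  have hcore : ∀ y, y < n → ∃ k, k ≤ n ∧ pvIter q' k y = pvRoot q y ∧
      pvIsRoot q' (pvRoot q y) := by
    intro y hy
    have hr := hg.2.2 y
    obtain ⟨k, hk, h1, h2⟩ := pvSet_root_core hg hx (pvDm q y hr) y hy hr le_rfl
    exact ⟨k, by have := pvDm_lt hg hy hr; omega, h1, h2⟩
  have hgood : pvGood n q' := by
    refine ⟨hlen', ?_, ?_⟩
    · intro z hz
      rw [hq', pvGetD_set]
      split_ifs with h
      · exact pvRoot_lt hg hx
      · exact hg.2.1 z hz
    · intro y
      rcases Nat.lt_or_ge y n with hy | hy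
      · obtain ⟨k, _, h1, h2⟩ := hcore y hy
        exact ⟨k, h1 ▸ h2⟩
      · exact pvReach_of_ge (by omega)
  refine ⟨hgood, ?_⟩
  intro y
  rcases Nat.lt_or_ge y n with hy | hy
  · obtain ⟨k, hk, h1, h2⟩ := hcore y hy
    exact pvRoot_eq_of_reach (by omega) (h1 ▸ h2) h1
  · rw [pvRoot_of_isRoot (pvIsRoot_of_ge (by omega)),
      pvRoot_of_isRoot (pvIsRoot_of_ge (by omega : q.length ≤ y))]

theorem ufFind_spec {n : Nat} : ∀ (fuel : Nat) (p : List Nat) (x : Nat), pvGood n p → x < n →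
    ∀ (hr : pvReach p x), pvDm p x hr < fuel →
    (ufFind fuel p x).1 = pvRoot p x ∧ pvGood n (ufFind fuel p x).2 ∧
      ∀ y, pvRoot (ufFind fuel p x).2 y = pvRoot p y := by
  intro fuel
  induction fuel with
  | zero => intro p x _ _ hr hd; omega
  | succ fuel ih =>
    intro p x hg hx hr hd
    by_cases hroot : pvIsRoot p x
    · have hpx : p.getD x x = x := hroot
      have heq : ufFind (fuel + 1) p x = (x, p) := by
        simp only [ufFind]
        rw [if_neg (not_ne_iff.mpr hpx), hpx]
      rw [heq]
      exact ⟨(pvRoot_of_isRoot hroot).symm, hg, fun _ => rfl⟩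
    · have hpx : p.getD x x ≠ x := hroot
      have hr' : pvReach p (p.getD x x) := hg.2.2 _
      have hx' : p.getD x x < n := hg.2.1 x hx
      have hd' : pvDm p _ hr' < fuel := by
        have := pvDm_succ hroot hr hr'
        have := pvDm_pos hroot hr
        omega
      obtain ⟨h1, h2, h3⟩ := ih p (p.getD x x) hg hx' hr' hd'
      have heq : ufFind (fuel + 1) p x =
          ((ufFind fuel p (p.getD x x)).1,
            (ufFind fuel p (p.getD x x)).2.set x (ufFind fuel p (p.getD x x)).1) := by
        simp only [ufFind]
        rw [if_pos hpx]
      rw [heq]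
      set q := (ufFind fuel p (p.getD x x)).2 with hq
      have hroot_eq : (ufFind fuel p (p.getD x x)).1 = pvRoot q x := by
        rw [h1, ← pvRoot_step hg hx, ← h3 x]
      rw [hroot_eq]
      have hset := pvSet_root h2 (x := x) (by omega)
      refine ⟨?_, hset.1, fun y => by rw [hset.2 y, h3 y]⟩
      rw [← hroot_eq, h1, pvRoot_step hg hx]

theorem pvLink_keeps_root {q : List Nat} {a b : Nat} (hab : a ≠ b)
    {r : Nat} (hr : pvIsRoot q r) (hrb : r ≠ b) : pvIsRoot (q.set b a) r := by
  unfold pvIsRoot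
  rw [pvGetD_set, if_neg (by tauto)]
  exact hr

theorem pvLink_core {n : Nat} {q : List Nat} (hg : pvGood n q) {a b : Nat}
    (hra : pvIsRoot q a) (hrb : pvIsRoot q b) (hab : a ≠ b) (han : a < n) (hbn : b < n) :
    ∀ m y, y < n → ∀ (hr : pvReach q y), pvDm q y hr ≤ m →
      ∃ k, k ≤ pvDm q y hr + 1 ∧
        pvIter (q.set b a) k y = (if pvRoot q y = b then a else pvRoot q y) ∧
        pvIsRoot (q.set b a) (if pvRoot q y = b then a else pvRoot q y) := by
  have hlen := hg.1
  have hkeep : ∀ y, pvIsRoot (q.set b a) (if pvRoot q y = b then a else pvRoot q y) := by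
    intro y
    split_ifs with h
    · exact pvLink_keeps_root hab hra hab
    · rcases Nat.lt_or_ge y n with hy | hy
      · exact pvLink_keeps_root hab (pvRoot_isRoot hg y) h
      · rw [pvRoot_of_isRoot (pvIsRoot_of_ge (by omega : q.length ≤ y))] at h ⊢
        exact pvLink_keeps_root hab (pvIsRoot_of_ge (by omega)) h
  have hrootcase : ∀ y, pvIsRoot q y → ∀ (hr : pvReach q y),
      ∃ k, k ≤ pvDm q y hr + 1 ∧
        pvIter (q.set b a) k y = (if pvRoot q y = b then a else pvRoot q y) ∧
        pvIsRoot (q.set b a) (if pvRoot q y = b then a else pvRoot q y) := by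
    intro y hroot hr
    by_cases hyb : y = b
    · subst hyb
      refine ⟨1, by omega, ?_, hkeep y⟩
      rw [pvRoot_of_isRoot hroot, if_pos rfl]
      show pvIter (q.set y a) 0 ((q.set y a).getD y y) = a
      rw [pvGetD_set, if_pos ⟨rfl, by omega⟩]; rfl
    · refine ⟨0, by omega, ?_, hkeep y⟩
      rw [pvRoot_of_isRoot hroot, if_neg hyb]
      rfl
  intro m
  induction m with
  | zero =>
    intro y hy hr hdm
    have hroot : pvIsRoot q y := by
      have := pvDm_spec q y hr
      rw [Nat.le_zero.mp hdm] at this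
      exact this
    exact hrootcase y hroot hr
  | succ m ih =>
    intro y hy hr hdm
    by_cases hroot : pvIsRoot q y
    · exact hrootcase y hroot hr
    · have hyb : y ≠ b := fun h => hroot (h ▸ hrb)
      have hz : q.getD y y < n := hg.2.1 y hy
      have hrz : pvReach q (q.getD y y) := hg.2.2 _
      have hdmz : pvDm q _ hrz ≤ pvDm q y hr - 1 := pvDm_succ hroot hr hrz
      have hpos : 1 ≤ pvDm q y hr := pvDm_pos hroot hr
      obtain ⟨k, hk, hiter, _⟩ := ih (q.getD y y) hz hrz (by omega)
      refine ⟨k + 1, by omega, ?_, hkeep y⟩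
      show pvIter (q.set b a) k ((q.set b a).getD y y) = _
      rw [pvGetD_set, if_neg (by tauto), hiter, ← pvRoot_step hg hy]

theorem pvLink {n : Nat} {q : List Nat} (hg : pvGood n q) {a b : Nat}
    (hra : pvIsRoot q a) (hrb : pvIsRoot q b) (hab : a ≠ b) (han : a < n) (hbn : b < n) :
    pvGood n (q.set b a) ∧
      ∀ y, y < n → pvRoot (q.set b a) y = (if pvRoot q y = b then a else pvRoot q y) := by
  have hlen := hg.1
  have hlen' : (q.set b a).length = n := by rw [List.length_set, hlen]
  have hcore : ∀ y, y < n → ∃ k, k ≤ n ∧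
      pvIter (q.set b a) k y = (if pvRoot q y = b then a else pvRoot q y) ∧
      pvIsRoot (q.set b a) (if pvRoot q y = b then a else pvRoot q y) := by
    intro y hy
    have hr := hg.2.2 y
    obtain ⟨k, hk, h1, h2⟩ := pvLink_core hg hra hrb hab han hbn (pvDm q y hr) y hy hr le_rfl
    exact ⟨k, by have := pvDm_lt hg hy hr; omega, h1, h2⟩
  have hgood : pvGood n (q.set b a) := by
    refine ⟨hlen', ?_, ?_⟩
    · intro z hz
      rw [pvGetD_set]
      split_ifs with h
      · omega
      · exact hg.2.1 z hz
    · intro y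
      rcases Nat.lt_or_ge y n with hy | hy
      · obtain ⟨k, _, h1, h2⟩ := hcore y hy
        exact ⟨k, h1 ▸ h2⟩
      · exact pvReach_of_ge (by omega)
  refine ⟨hgood, fun y hy => ?_⟩
  obtain ⟨k, hk, h1, h2⟩ := hcore y hy
  exact pvRoot_eq_of_reach (by omega) (h1 ▸ h2) h1
-- ===== bisimulation: union ~ relabel =====
def pvBStep (label : List Nat) (x y : Nat) : List Nat :=
  let a := label.getD x 0
  let b := label.getD y 0
  if a ≠ b then bRelabel label a b else label

def pvInv (n : Nat) (p label : List Nat) : Prop :=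
  pvGood n p ∧ label.length = n ∧
    ∀ i j, i < n → j < n →
      (pvRoot p i = pvRoot p j ↔ label.getD i 0 = label.getD j 0)

theorem pvRelabel_getD (label : List Nat) (a b i : Nat) (hi : i < label.length) :
    (bRelabel label a b).getD i 0 = (if label.getD i 0 = b then a else label.getD i 0) := by
  simp [bRelabel, List.getD_eq_getElem?_getD, List.getElem?_map, List.getElem?_eq_getElem hi]

theorem pvMergeIff {u v ri rj : Nat} (huv : u ≠ v) :
    ((if ri = v then u else ri) = (if rj = v then u else rj)) ↔
      (ri = rj ∨ ((ri = u ∨ ri = v) ∧ (rj = u ∨ rj = v))) := by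
  split_ifs <;> omega

theorem pvUnion_bisim {n : Nat} {p rk label : List Nat} (h : pvInv n p label)
    {x y : Nat} (hx : x < n) (hy : y < n) :
    pvInv n (ufUnion (p, rk) x y).1 (pvBStep label x y) := by
  obtain ⟨hg, hlab, hrel⟩ := h
  have hlen := hg.1
  have hr1 := hg.2.2 x
  have hf1 := ufFind_spec (p.length + 1) p x hg hx hr1 (by have := pvDm_lt hg hx hr1; omega)
  obtain ⟨hf1a, hf1g, hf1r⟩ := hf1
  set f1 := ufFind (p.length + 1) p x with hf1def
  have hlen1 : f1.2.length = n := hf1g.1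
  have hr2 := hf1g.2.2 y
  have hf2 := ufFind_spec (f1.2.length + 1) f1.2 y hf1g hy hr2
    (by have := pvDm_lt hf1g hy hr2; omega)
  obtain ⟨hf2a, hf2g, hf2r⟩ := hf2
  set f2 := ufFind (f1.2.length + 1) f1.2 y with hf2def
  have hrx : f1.1 = pvRoot p x := hf1a
  have hry : f2.1 = pvRoot p y := by rw [hf2a, hf1r]
  have hroots2 : ∀ z, pvRoot f2.2 z = pvRoot p z := fun z => by rw [hf2r, hf1r]
  have hiff : f1.1 = f2.1 ↔ label.getD x 0 = label.getD y 0 := by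
    rw [hrx, hry]; exact hrel x y hx hy
  have hgu : ufUnion (p, rk) x y =
      (if f1.1 = f2.1 then (f2.2, rk)
       else
        let pq := if rk.getD f1.1 0 < rk.getD f2.1 0 then (f2.1, f1.1) else (f1.1, f2.1)
        (f2.2.set pq.2 pq.1,
         if rk.getD pq.1 0 = rk.getD pq.2 0 then rk.set pq.1 (rk.getD pq.1 0 + 1) else rk)) := by
    rfl
  by_cases heq : f1.1 = f2.1
  · have hlabeq : label.getD x 0 = label.getD y 0 := hiff.mp heq
    have hu0 : (ufUnion (p, rk) x y).1 = f2.2 := by rw [hgu, if_pos heq]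
    have hb0 : pvBStep label x y = label := by
      unfold pvBStep
      rw [if_neg (by simpa using hlabeq)]
    rw [hu0, hb0]
    refine ⟨hf2g, hlab, fun i j hi hj => ?_⟩
    rw [hroots2, hroots2]
    exact hrel i j hi hj
  · have hlabne : label.getD x 0 ≠ label.getD y 0 := fun hc => heq (hiff.mpr hc)
    set a := label.getD x 0 with ha
    set b := label.getD y 0 with hbdef
    set pq := if rk.getD f1.1 0 < rk.getD f2.1 0 then (f2.1, f1.1) else (f1.1, f2.1) with hpq
    have hu1 : (ufUnion (p, rk) x y).1 = f2.2.set pq.2 pq.1 := by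
      rw [hgu, if_neg heq]
    have hb1 : pvBStep label x y = bRelabel label a b := by
      unfold pvBStep
      rw [if_pos (by simpa using hlabne)]
    rw [hu1, hb1]
    have hset : (pq.1 = f1.1 ∧ pq.2 = f2.1) ∨ (pq.1 = f2.1 ∧ pq.2 = f1.1) := by
      rw [hpq]; split_ifs <;> simp
    have hq1root : pvIsRoot f2.2 pq.1 := by
      rcases hset with ⟨h1, _⟩ | ⟨h1, _⟩ <;> rw [h1]
      · rw [hrx, ← hroots2 x]; exact pvRoot_isRoot hf2g x
      · rw [hry, ← hroots2 y]; exact pvRoot_isRoot hf2g y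
    have hq2root : pvIsRoot f2.2 pq.2 := by
      rcases hset with ⟨_, h2⟩ | ⟨_, h2⟩ <;> rw [h2]
      · rw [hry, ← hroots2 y]; exact pvRoot_isRoot hf2g y
      · rw [hrx, ← hroots2 x]; exact pvRoot_isRoot hf2g x
    have hqne : pq.1 ≠ pq.2 := by
      rcases hset with ⟨h1, h2⟩ | ⟨h1, h2⟩ <;> rw [h1, h2]
      · exact heq
      · exact fun hc => heq hc.symm
    have hq1n : pq.1 < n := by
      rcases hset with ⟨h1, _⟩ | ⟨h1, _⟩ <;> rw [h1]
      · rw [hrx]; exact pvRoot_lt hg hx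
      · rw [hry]; exact pvRoot_lt hg hy
    have hq2n : pq.2 < n := by
      rcases hset with ⟨_, h2⟩ | ⟨_, h2⟩ <;> rw [h2]
      · rw [hry]; exact pvRoot_lt hg hy
      · rw [hrx]; exact pvRoot_lt hg hx
    obtain ⟨hg3, hroots3⟩ := pvLink hf2g hq1root hq2root hqne hq1n hq2n
    refine ⟨hg3, by simp [bRelabel, hlab], fun i j hi hj => ?_⟩
    rw [hroots3 i hi, hroots3 j hj, hroots2, hroots2,
      pvRelabel_getD label a b i (by omega), pvRelabel_getD label a b j (by omega),
      pvMergeIff hqne, pvMergeIff hlabne]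
    -- transfer: pvRoot p i ∈ {pq.1, pq.2} = {root x, root y} ↔ label i ∈ {a, b}
    have htr : ∀ z, z < n →
        ((pvRoot p z = pq.1 ∨ pvRoot p z = pq.2) ↔
          (label.getD z 0 = a ∨ label.getD z 0 = b)) := by
      intro z hz
      have e1 : (pvRoot p z = pvRoot p x) ↔ label.getD z 0 = a := hrel z x hz hx
      have e2 : (pvRoot p z = pvRoot p y) ↔ label.getD z 0 = b := hrel z y hz hy
      rcases hset with ⟨h1, h2⟩ | ⟨h1, h2⟩
      · rw [h1, h2, hrx, hry]
        exact or_congr e1 e2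
      · rw [h1, h2, hrx, hry]
        rw [or_comm]
        exact or_congr e1 e2
    have hmain := hrel i j hi hj
    have h1 := htr i hi
    have h2 := htr j hj
    exact or_congr hmain (and_congr h1 h2)
-- ===== fold-level bisimulation =====
theorem pvIdxFold_bisim {n : Nat} (first : Nat) (hf : first < n) :
    ∀ (idxs : List Nat), (∀ i ∈ idxs, i < n) →
    ∀ (p rk label : List Nat), pvInv n p label →
      pvInv n (idxs.foldl (fun st idx => ufUnion st first idx) (p, rk)).1
        (idxs.foldl (fun lab idx => pvBStep lab first idx) label) := by
  intro idxs
  induction idxs with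
  | nil => intro _ p rk label h; exact h
  | cons i rest ih =>
    intro hb p rk label h
    have hi : i < n := hb i (by simp)
    have hstep := pvUnion_bisim h (rk := rk) hf hi
    have : ufUnion (p, rk) first i =
        ((ufUnion (p, rk) first i).1, (ufUnion (p, rk) first i).2) := rfl
    simp only [List.foldl_cons]
    rw [this]
    exact ih (fun j hj => hb j (by simp [hj])) _ _ _ hstep

-- the body of B's inner fold is pvBStep
theorem pvBStep_eq (first : Nat) :
    (fun (label : List Nat) (idx : Nat) =>
      let a := label.getD first 0
      let b := label.getD idx 0
      if a ≠ b then bRelabel label a b else label) =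
    (fun lab idx => pvBStep lab first idx) := rfl

theorem pvBucketsFold_bisim {n : Nat} :
    ∀ (l : List (String × List Nat)),
      (∀ q ∈ l, q.2 ≠ [] ∧ ∀ i ∈ q.2, i < n) →
    ∀ (p rk label : List Nat), pvInv n p label →
      pvInv n
        (l.foldl
          (fun st vr =>
            let ris := vr.2
            if 1 < ris.length then
              let first := ris.headD 0
              (ris.drop 1).foldl (fun st idx => ufUnion st first idx) st
            else st) (p, rk)).1
        ((l.map (·.2)).foldl
          (fun label members =>
            let first := members.headD 0
            (members.drop 1).foldl
              (fun label idx =>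
                let a := label.getD first 0
                let b := label.getD idx 0
                if a ≠ b then bRelabel label a b else label) label) label) := by
  intro l
  induction l with
  | nil => intro _ p rk label h; exact h
  | cons q rest ih =>
    intro hb p rk label h
    obtain ⟨hne, hlt⟩ := hb q (by simp)
    have hfirst : q.2.headD 0 ∈ q.2 := by
      cases hq : q.2 with
      | nil => exact absurd hq hne
      | cons a t => simp [List.headD]
    have hfn : q.2.headD 0 < n := hlt _ hfirst
    have hdlt : ∀ i ∈ q.2.drop 1, i < n := fun i hi => hlt i (List.mem_of_mem_drop hi)
    simp only [List.map_cons, List.foldl_cons]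
    rw [pvBStep_eq]
    by_cases hlen : 1 < q.2.length
    · rw [if_pos hlen]
      exact ih (fun r hr => hb r (by simp [hr])) _ _ _
        (pvIdxFold_bisim _ hfn _ hdlt _ _ _ h)
    · rw [if_neg hlen]
      have hdrop : q.2.drop 1 = [] := by
        rw [List.drop_eq_nil_iff]
        omega
      rw [hdrop]
      exact ih (fun r hr => hb r (by simp [hr])) _ _ _ h
-- ===== bucket dictionaries: properties and A/B agreement =====

-- every bucket list is nonempty with indices < rows.length
theorem pvBuckets_wf (rows : List (List (String × String))) (k : String) :
    ∀ q ∈ (bBuckets rows k).items, q.2 ≠ [] ∧ ∀ i ∈ q.2, i < rows.length := by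
  have main : ∀ (l : List ((List (String × String)) × Nat)) (d : PySem.Dict String (List Nat)),
      (∀ ri ∈ l, ri.2 < rows.length) →
      (∀ q ∈ d.items, q.2 ≠ [] ∧ ∀ i ∈ q.2, i < rows.length) →
      ∀ q ∈ (l.foldl
        (fun d ri =>
          match (PySem.Dict.mk ri.1).get? k with
          | some v => if v ≠ "" then d.insert v (d.getD v [] ++ [ri.2]) else d
          | none => d) d).items, q.2 ≠ [] ∧ ∀ i ∈ q.2, i < rows.length := by
    intro l
    induction l with
    | nil => intro d _ hd; exact hd
    | cons ri rest ih =>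
      intro d hl hd
      simp only [List.foldl_cons]
      apply ih _ (fun r hr => hl r (by simp [hr]))
      match hrow : (PySem.Dict.mk ri.1).get? k with
      | none => simpa [hrow] using hd
      | some v =>
        by_cases hv : v ≠ ""
        · simp only [hrow, if_pos hv]
          intro q hq
          have hri : ri.2 < rows.length := hl ri (by simp)
          have hold : ∀ i ∈ (PySem.Dict.getD d v [] ++ [ri.2]), i < rows.length := by
            intro i hi
            rcases List.mem_append.mp hi with h | h
            · rw [PySem.Dict.getD_eq_get?_getD] at h
              match hget : d.get? v with
              | none => rw [hget] at h; simp at h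
              | some old =>
                rw [hget] at h
                exact (hd _ (PySem.Dict.mem_items_of_get?_eq_some d hget)).2 i h
            · simp at h; omega
          by_cases hc : d.contains v
          · rw [PySem.Dict.items_insert_of_contains d _ hc] at hq
            rcases List.mem_map.mp hq with ⟨q0, hq0, hq0e⟩
            by_cases hm : q0.1 == v
            · rw [if_pos hm] at hq0e
              subst hq0e
              exact ⟨by simp, hold⟩
            · rw [if_neg hm] at hq0e
              subst hq0e
              exact hd q0 hq0
          · rw [PySem.Dict.items_insert_of_not_contains d _ (by simpa using hc)] at hq
            rcases List.mem_append.mp hq with h | h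
            · exact hd q h
            · simp only [List.mem_singleton] at h
              subst h
              exact ⟨by simp, hold⟩
        · simpa [hrow, hv] using hd
  intro q hq
  apply main rows.zipIdx (PySem.Dict.mk []) _ _ q hq
  · intro ri hri
    simpa using List.snd_lt_of_mem_zipIdx hri
  · intro q hq
    simp [PySem.Dict.items] at hq
-- ===== A's nested indices split into three per-type scans =====
def pvStepT (t : String) (d : PySem.Dict String (List Nat))
    (ri : (List (String × String)) × Nat) : PySem.Dict String (List Nat) :=
  let rowd := PySem.Dict.mk ri.1
  if rowd.contains t ∧ rowd.getD t "" ≠ "" then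
    d.insert (rowd.getD t "") (d.getD (rowd.getD t "") [] ++ [ri.2])
  else d

def pvScanA (rows : List (List (String × String))) (t : String) :
    PySem.Dict String (List Nat) :=
  rows.zipIdx.foldl (pvStepT t) (PySem.Dict.mk [])

def pvThree (C I F : PySem.Dict String (List Nat)) :
    PySem.Dict String (PySem.Dict String (List Nat)) :=
  PySem.Dict.mk [("cusip", C), ("isin", I), ("figi", F)]

theorem pvThree_init :
    (((PySem.Dict.mk []).insert "cusip" (PySem.Dict.mk [])).insert "isin" (PySem.Dict.mk [])
      |>.insert "figi" (PySem.Dict.mk [])) =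
    pvThree (PySem.Dict.mk []) (PySem.Dict.mk []) (PySem.Dict.mk []) := by rfl

theorem pvThree_getD_c (C I F d) : (pvThree C I F).getD "cusip" d = C := by rfl
theorem pvThree_getD_i (C I F d) : (pvThree C I F).getD "isin" d = I := by rfl
theorem pvThree_getD_f (C I F d) : (pvThree C I F).getD "figi" d = F := by rfl
theorem pvThree_ins_c (C I F X) : (pvThree C I F).insert "cusip" X = pvThree X I F := by rfl
theorem pvThree_ins_i (C I F X) : (pvThree C I F).insert "isin" X = pvThree C X F := by rfl
theorem pvThree_ins_f (C I F X) : (pvThree C I F).insert "figi" X = pvThree C I X := by rfl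

def pvAKey (row : List (String × String)) (i : Nat)
    (d : PySem.Dict String (PySem.Dict String (List Nat))) (t : String) :
    PySem.Dict String (PySem.Dict String (List Nat)) :=
  let rowd := PySem.Dict.mk row
  if rowd.contains t ∧ rowd.getD t "" ≠ "" then
    let value := rowd.getD t ""
    let inner := d.getD t (PySem.Dict.mk [])
    d.insert t (inner.insert value (inner.getD value [] ++ [i]))
  else d

theorem pvAKey_c (row i C I F) :
    pvAKey row i (pvThree C I F) "cusip" = pvThree (pvStepT "cusip" C (row, i)) I F := by
  unfold pvAKey pvStepT
  simp only []
  split_ifs with h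
  · rw [pvThree_getD_c, pvThree_ins_c]
  · rfl

theorem pvAKey_i (row i C I F) :
    pvAKey row i (pvThree C I F) "isin" = pvThree C (pvStepT "isin" I (row, i)) F := by
  unfold pvAKey pvStepT
  simp only []
  split_ifs with h
  · rw [pvThree_getD_i, pvThree_ins_i]
  · rfl

theorem pvAKey_f (row i C I F) :
    pvAKey row i (pvThree C I F) "figi" = pvThree C I (pvStepT "figi" F (row, i)) := by
  unfold pvAKey pvStepT
  simp only []
  split_ifs with h
  · rw [pvThree_getD_f, pvThree_ins_f]
  · rfl

theorem pvIndexStep_three (C I F row i) :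
    aIndexStep (pvThree C I F) row i =
      pvThree (pvStepT "cusip" C (row, i)) (pvStepT "isin" I (row, i))
        (pvStepT "figi" F (row, i)) := by
  rw [show aIndexStep (pvThree C I F) row i
      = pvKeys.foldl (pvAKey row i) (pvThree C I F) from rfl]
  simp only [pvKeys, List.foldl_cons, List.foldl_nil, pvAKey_c, pvAKey_i, pvAKey_f]

theorem pvBuildIndices_eq (rows : List (List (String × String))) :
    aBuildIndices rows =
      pvThree (pvScanA rows "cusip") (pvScanA rows "isin") (pvScanA rows "figi") := by
  unfold aBuildIndices pvScanA
  rw [pvThree_init]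
  generalize rows.zipIdx = l
  have main : ∀ (l : List ((List (String × String)) × Nat)) C I F,
      l.foldl (fun d ri => aIndexStep d ri.1 ri.2) (pvThree C I F) =
        pvThree (l.foldl (pvStepT "cusip") C) (l.foldl (pvStepT "isin") I)
          (l.foldl (pvStepT "figi") F) := by
    intro l
    induction l with
    | nil => intro C I F; rfl
    | cons ri rest ih =>
      intro C I F
      simp only [List.foldl_cons, pvIndexStep_three]
      exact ih _ _ _
  exact main l _ _ _
-- ===== A's per-type scan is B's bucket dict =====
theorem pvScanA_eq_bBuckets (rows : List (List (String × String))) (t : String) :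
    pvScanA rows t = bBuckets rows t := by
  unfold pvScanA bBuckets
  apply PySem.List.foldl_congr_mem
  intro d ri _
  unfold pvStepT
  simp only []
  match hget : (PySem.Dict.mk ri.1).get? t with
  | none =>
    show _ = d
    rw [if_neg]
    intro ⟨hc, _⟩
    rw [(PySem.Dict.get?_eq_none_iff_contains _ _).mp hget] at hc
    exact Bool.false_ne_true hc
  | some v =>
    have hc : (PySem.Dict.mk ri.1).contains t = true := by
      rw [PySem.Dict.contains_eq_isSome_get?, hget]; rfl
    have hgd : (PySem.Dict.mk ri.1).getD t "" = v := by
      rw [PySem.Dict.getD_eq_get?_getD, hget]; rfl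
    show _ = if v ≠ "" then d.insert v (d.getD v [] ++ [ri.2]) else d
    by_cases hv : v ≠ ""
    · rw [if_pos ⟨hc, by rw [hgd]; exact hv⟩, if_pos hv, hgd]
    · rw [if_neg (by rw [hgd]; tauto), if_neg hv]

theorem pvRange_getD (n x : Nat) : (List.range n).getD x x = x := by
  rcases Nat.lt_or_ge x n with h | h
  · simp [List.getD_eq_getElem?_getD, List.getElem?_range, h]
  · simp [List.getD_eq_getElem?_getD, List.getElem?_eq_none (by simpa using h : (List.range n).length ≤ x)]

theorem pvRange_getD0 (n i : Nat) (hi : i < n) : (List.range n).getD i 0 = i := by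
  simp [List.getD_eq_getElem?_getD, List.getElem?_range, hi]

theorem pvInv_init (n : Nat) : pvInv n (List.range n) (List.range n) := by
  have hroot : ∀ x, pvIsRoot (List.range n) x := fun x => pvRange_getD n x
  refine ⟨⟨List.length_range, ?_, fun x => ⟨0, hroot x⟩⟩, List.length_range, ?_⟩
  · intro x hx
    rw [pvRange_getD]; exact hx
  · intro i j hi hj
    rw [pvRoot_of_isRoot (hroot i), pvRoot_of_isRoot (hroot j),
      pvRange_getD0 n i hi, pvRange_getD0 n j hj]

theorem pvConnect_bisim (rows : List (List (String × String))) :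
    pvInv rows.length
      (aConnect (aBuildIndices rows)
        (List.range rows.length, List.replicate rows.length 0)).1
      (bLabelPhase rows) := by
  rw [pvBuildIndices_eq]
  unfold aConnect bLabelPhase
  simp only [pvKeys, pvKeys, List.foldl_cons, List.foldl_nil,
    pvThree_getD_c, pvThree_getD_i, pvThree_getD_f]
  have hval : ∀ t, (bBuckets rows t).values = (pvScanA rows t).items.map (·.2) := by
    intro t; rw [pvScanA_eq_bBuckets]; rfl
  have hwf : ∀ t, ∀ q ∈ (pvScanA rows t).items, q.2 ≠ [] ∧ ∀ i ∈ q.2, i < rows.length := by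
    intro t
    rw [pvScanA_eq_bBuckets]
    exact pvBuckets_wf rows t
  rw [hval "cusip", hval "isin", hval "figi"]
  have h0 := pvInv_init rows.length
  have h1 := pvBucketsFold_bisim ((pvScanA rows "cusip").items) (hwf "cusip")
    (List.range rows.length) (List.replicate rows.length 0) (List.range rows.length) h0
  set st1 := ((pvScanA rows "cusip").items).foldl _ (List.range rows.length, List.replicate rows.length 0) with hst1
  have h2 := pvBucketsFold_bisim ((pvScanA rows "isin").items) (hwf "isin") st1.1 st1.2 _ h1
  rw [show (st1.1, st1.2) = st1 from rfl] at h2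
  set st2 := ((pvScanA rows "isin").items).foldl _ st1 with hst2
  have h3 := pvBucketsFold_bisim ((pvScanA rows "figi").items) (hwf "figi") st2.1 st2.2 _ h2
  rw [show (st2.1, st2.2) = st2 from rfl] at h3
  exact h3
-- ===== get_groups: the threaded finds compute pvRoot of the final parent =====
def pvGroupFold (R : Nat → Nat) (l : List Nat) (d : PySem.Dict Nat (List Nat)) :
    PySem.Dict Nat (List Nat) :=
  l.foldl (fun d i => d.insert (R i) (d.getD (R i) [] ++ [i])) d

theorem pvGetGroups_spec {n : Nat} :
    ∀ (l : List Nat) (d : PySem.Dict Nat (List Nat)) (p : List Nat), pvGood n p →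
      (∀ i ∈ l, i < n) →
      (l.foldl
        (fun st i =>
          let f := ufFind (st.2.length + 1) st.2 i
          (st.1.insert f.1 (st.1.getD f.1 [] ++ [i]), f.2)) (d, p)).1 =
        pvGroupFold (pvRoot p) l d := by
  intro l
  induction l with
  | nil => intro d p _ _; rfl
  | cons i rest ih =>
    intro d p hg hl
    have hi : i < n := hl i (by simp)
    have hr := hg.2.2 i
    have hlen : p.length = n := hg.1
    obtain ⟨hf1, hf2, hf3⟩ := ufFind_spec (p.length + 1) p i hg hi hr
      (by have := pvDm_lt hg hi hr; omega)
    simp only [List.foldl_cons, pvGroupFold]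
    rw [hf1]
    have := ih (d.insert (pvRoot p i) (d.getD (pvRoot p i) [] ++ [i]))
      (ufFind (p.length + 1) p i).2 hf2 (fun j hj => hl j (by simp [hj]))
    rw [this]
    unfold pvGroupFold
    exact PySem.List.foldl_congr_mem _ _ _ _ (fun acc j _ => by rw [hf3 j])

theorem ufGetGroups_eq {n : Nat} (p : List Nat) (hg : pvGood n p) :
    (ufGetGroups p).1 = pvGroupFold (pvRoot p) (List.range n) (PySem.Dict.mk []) := by
  unfold ufGetGroups
  rw [hg.1]
  exact pvGetGroups_spec (List.range n) _ p hg (fun i hi => List.mem_range.mp hi)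

-- ===== grouping correspondence =====
def pvUpd (key : Nat → Nat) (ps : List (Nat × List Nat)) (i : Nat) : List (Nat × List Nat) :=
  if ps.any (fun q => key q.1 == key i) then
    ps.map (fun q => if key q.1 = key i then (q.1, q.2 ++ [i]) else q)
  else ps ++ [(i, [i])]

-- decompose at the first (unique) match
theorem pvDecomp (key : Nat → Nat) (i : Nat) :
    ∀ ps : List (Nat × List Nat), (ps.map fun q => key q.1).Nodup →
      (ps.any fun q => key q.1 == key i) = true →
      ∃ ps1 q ps2, ps = ps1 ++ q :: ps2 ∧ (∀ r ∈ ps1, key r.1 ≠ key i) ∧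
        key q.1 = key i ∧ (∀ r ∈ ps2, key r.1 ≠ key i) := by
  intro ps
  induction ps with
  | nil => intro _ h; simp at h
  | cons q rest ih =>
    intro hnd hex
    simp only [List.map_cons, List.nodup_cons] at hnd
    by_cases hq : key q.1 = key i
    · refine ⟨[], q, rest, by simp, by simp, hq, ?_⟩
      intro r hr hcon
      exact hnd.1 (List.mem_map.mpr ⟨r, hr, by rw [hcon, hq]⟩)
    · have hex' : (rest.any fun q => key q.1 == key i) = true := by
        simp only [List.any_cons] at hex
        rcases Bool.or_eq_true_iff.mp hex with h | h
        · exact absurd (by simpa using h) hq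
        · exact h
      obtain ⟨ps1, qm, ps2, heq, h1, h2, h3⟩ := ih hnd.2 hex'
      exact ⟨q :: ps1, qm, ps2, by simp [heq], by
        intro r hr
        rcases List.mem_cons.mp hr with rfl | hr
        · exact hq
        · exact h1 r hr, h2, h3⟩

theorem pvGet_first (key : Nat → Nat) (i : Nat) (q : Nat × List Nat) (ps2 : List (Nat × List Nat))
    (h2 : key q.1 = key i) :
    ∀ ps1 : List (Nat × List Nat), (∀ r ∈ ps1, key r.1 ≠ key i) →
      (PySem.Dict.mk ((ps1 ++ q :: ps2).map fun q => (key q.1, q.2))).get? (key i) = some q.2 := by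
  intro ps1
  induction ps1 with
  | nil =>
    intro _
    simp only [List.nil_append, List.map_cons]
    rw [PySem.Dict.get?_mk_cons, if_pos (by simpa using h2)]
  | cons r rest ih =>
    intro h1
    simp only [List.cons_append, List.map_cons]
    rw [PySem.Dict.get?_mk_cons, if_neg (by simpa using h1 r (by simp))]
    exact ih (fun r' hr' => h1 r' (by simp [hr']))

theorem pvRepl_id (key : Nat → Nat) (i : Nat) (w : List Nat) :
    ∀ ps : List (Nat × List Nat), (∀ r ∈ ps, key r.1 ≠ key i) →
      (ps.map fun q => (key q.1, q.2)).map
          (fun p => if p.1 == key i then (key i, w) else p) =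
        ps.map fun q => (key q.1, q.2) := by
  intro ps hps
  rw [List.map_map, List.map_congr_left]
  intro r hr
  simp only [Function.comp]
  rw [if_neg (by simpa using hps r hr)]

theorem pvUpd_id (key : Nat → Nat) (i : Nat) :
    ∀ ps : List (Nat × List Nat), (∀ r ∈ ps, key r.1 ≠ key i) →
      ps.map (fun q => if key q.1 = key i then (q.1, q.2 ++ [i]) else q) = ps := by
  intro ps hps
  rw [List.map_congr_left (fun r hr => by rw [if_neg (hps r hr)])]
  simp

-- Dict.insert on a keyed image of ps is pvUpd, provided the keys are distinct
theorem pvInsert_upd (key : Nat → Nat) (i : Nat)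
    (ps : List (Nat × List Nat)) (hnd : (ps.map fun q => key q.1).Nodup) :
    (PySem.Dict.mk (ps.map fun q => (key q.1, q.2))).insert (key i)
        ((PySem.Dict.mk (ps.map fun q => (key q.1, q.2))).getD (key i) [] ++ [i]) =
      PySem.Dict.mk ((pvUpd key ps i).map fun q => (key q.1, q.2)) := by
  by_cases hc : (PySem.Dict.mk (ps.map fun q => (key q.1, q.2))).contains (key i)
  · have hex : (ps.any fun q => key q.1 == key i) = true := by
      have := hc
      simp only [PySem.Dict.contains, List.any_map] at this
      simpa using this
    obtain ⟨ps1, q, ps2, rfl, h1, h2, h3⟩ := pvDecomp key i ps hnd hex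
    have hgd : (PySem.Dict.mk ((ps1 ++ q :: ps2).map fun q => (key q.1, q.2))).getD (key i) []
        = q.2 := by
      rw [PySem.Dict.getD_eq_get?_getD, pvGet_first key i q ps2 h2 ps1 h1]
      rfl
    apply PySem.Dict.ext
    rw [PySem.Dict.items_insert_of_contains _ _ hc, hgd]
    unfold pvUpd
    rw [if_pos hex]
    show ((ps1 ++ q :: ps2).map fun q => (key q.1, q.2)).map _ =
      (((ps1 ++ q :: ps2).map fun q => if key q.1 = key i then (q.1, q.2 ++ [i]) else q).map
        fun q => (key q.1, q.2))
    simp only [List.map_append, List.map_cons]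
    rw [pvRepl_id key i _ ps1 h1, pvRepl_id key i _ ps2 h3,
      pvUpd_id key i ps1 h1, pvUpd_id key i ps2 h3]
    simp [h2]
  · have hex : (ps.any fun q => key q.1 == key i) = false := by
      have := hc
      simp only [PySem.Dict.contains, List.any_map] at this
      simpa using this
    have hgd : (PySem.Dict.mk (ps.map fun q => (key q.1, q.2))).getD (key i) [] = [] := by
      rw [PySem.Dict.getD_eq_get?_getD,
        (PySem.Dict.get?_eq_none_iff_contains _ _).mpr (by simpa using hc)]
      rfl
    apply PySem.Dict.ext
    rw [PySem.Dict.items_insert_of_not_contains _ _ (by simpa using hc), hgd]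
    unfold pvUpd
    rw [if_neg (by simp [hex])]
    simp
theorem pvUpd_congr (R L : Nat → Nat) (i : Nat) (ps : List (Nat × List Nat))
    (h : ∀ q ∈ ps, (R q.1 = R i ↔ L q.1 = L i)) : pvUpd R ps i = pvUpd L ps i := by
  unfold pvUpd
  have hany : (ps.any fun q => R q.1 == R i) = (ps.any fun q => L q.1 == L i) := by
    apply PySem.List.any_congr_mem
    intro q hq
    have := h q hq
    by_cases hr : R q.1 = R i
    · simp [hr, this.mp hr]
    · have hl' : ¬ L q.1 = L i := fun hc => hr (this.mpr hc)
      simp [hr, hl']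
  rw [hany]
  by_cases hc : (ps.any fun q => L q.1 == L i) = true
  · rw [if_pos hc, if_pos hc]
    apply List.map_congr_left
    intro q hq
    have := h q hq
    by_cases hr : R q.1 = R i
    · rw [if_pos hr, if_pos (this.mp hr)]
    · rw [if_neg hr, if_neg (fun hc2 => hr (this.mpr hc2))]
  · rw [if_neg hc, if_neg hc]

theorem pvGroup_corr {n : Nat} (R L : Nat → Nat)
    (hRL : ∀ i j, i < n → j < n → (R i = R j ↔ L i = L j)) :
    ∀ (l : List Nat), (∀ i ∈ l, i < n) →
    ∀ (ps : List (Nat × List Nat)), (∀ q ∈ ps, q.1 < n) →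
      (ps.map fun q => R q.1).Nodup →
      ∃ ps' : List (Nat × List Nat), (∀ q ∈ ps', q.1 < n) ∧ (ps'.map fun q => R q.1).Nodup ∧
        pvGroupFold R l (PySem.Dict.mk (ps.map fun q => (R q.1, q.2)))
          = PySem.Dict.mk (ps'.map fun q => (R q.1, q.2)) ∧
        pvGroupFold L l (PySem.Dict.mk (ps.map fun q => (L q.1, q.2)))
          = PySem.Dict.mk (ps'.map fun q => (L q.1, q.2)) := by
  intro l
  induction l with
  | nil =>
    intro _ ps hps hnd
    exact ⟨ps, hps, hnd, rfl, rfl⟩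
  | cons i rest ih =>
    intro hl ps hps hnd
    have hin : i < n := hl i (by simp)
    have hndL : (ps.map fun q => L q.1).Nodup := by
      rw [List.Nodup, List.pairwise_map] at hnd ⊢
      refine hnd.imp_of_mem ?_
      intro a b ha hb hne hc
      exact hne ((hRL a.1 b.1 (hps a ha) (hps b hb)).mpr hc)
    have hcong : ∀ q ∈ ps, (R q.1 = R i ↔ L q.1 = L i) :=
      fun q hq => hRL q.1 i (hps q hq) hin
    have hstepR := pvInsert_upd R i ps hnd
    have hstepL := pvInsert_upd L i ps hndL
    rw [pvUpd_congr R L i ps hcong] at hstepR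
    have hps2 : ∀ q ∈ pvUpd L ps i, q.1 < n := by
      intro q hq
      unfold pvUpd at hq
      split_ifs at hq with h
      · rcases List.mem_map.mp hq with ⟨q0, hq0, rfl⟩
        split_ifs <;> exact hps q0 hq0
      · rcases List.mem_append.mp hq with h | h
        · exact hps q h
        · simp only [List.mem_singleton] at h
          subst h
          exact hin
    have hnd2 : ((pvUpd L ps i).map fun q => R q.1).Nodup := by
      rw [← pvUpd_congr R L i ps hcong]
      unfold pvUpd
      split_ifs with h
      · have heq : ((ps.map fun q => if R q.1 = R i then (q.1, q.2 ++ [i]) else q).map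
            fun q => R q.1) = ps.map fun q => R q.1 := by
          rw [List.map_map]
          apply List.map_congr_left
          intro q hq
          simp only [Function.comp]
          split_ifs <;> rfl
        rw [heq]
        exact hnd
      · rw [List.map_append, List.nodup_append]
        refine ⟨hnd, by simp, ?_⟩
        intro z hz w hw heq
        rcases List.mem_map.mp hz with ⟨q, hq, hqe⟩
        have hw' : w = R i := by simpa using hw
        exact h (List.any_eq_true.mpr ⟨q, hq, by simp only [hqe, heq, hw', beq_self_eq_true]⟩)
    obtain ⟨ps', h1, h2, h3, h4⟩ := ih (fun j hj => hl j (by simp [hj])) (pvUpd L ps i) hps2 hnd2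
    refine ⟨ps', h1, h2, ?_, ?_⟩
    · rw [← h3]
      show pvGroupFold R rest
        ((PySem.Dict.mk (ps.map fun q => (R q.1, q.2))).insert (R i)
          ((PySem.Dict.mk (ps.map fun q => (R q.1, q.2))).getD (R i) [] ++ [i])) = _
      rw [hstepR]
    · rw [← h4]
      show pvGroupFold L rest
        ((PySem.Dict.mk (ps.map fun q => (L q.1, q.2))).insert (L i)
          ((PySem.Dict.mk (ps.map fun q => (L q.1, q.2))).getD (L i) [] ++ [i])) = _
      rw [hstepL]
-- ===== merge phase: A's and B's merges agree =====
theorem pvMerge_eq (rows : List (List (String × String))) (gis : List Nat) :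
    aMergeGroup rows gis = bMergeGroup rows gis := by
  unfold aMergeGroup bMergeGroup
  apply PySem.List.foldl_congr_mem
  intro merged idx _
  simp only []
  apply PySem.List.foldl_congr_mem
  intro m k _
  set rowd := PySem.Dict.mk (rows.getD idx []) with hrowd
  match hget : rowd.get? k with
  | none =>
    show _ = m
    rw [if_neg]
    intro ⟨hc, _⟩
    rw [(PySem.Dict.get?_eq_none_iff_contains _ _).mp hget] at hc
    exact Bool.false_ne_true hc
  | some v =>
    have hc : rowd.contains k = true := by
      rw [PySem.Dict.contains_eq_isSome_get?, hget]; rfl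
    have hgd : rowd.getD k "" = v := by
      rw [PySem.Dict.getD_eq_get?_getD, hget]; rfl
    show _ = if v ≠ "" ∧ ¬ m.contains k then m.insert k v else m
    by_cases hv : v ≠ ""
    · rw [if_pos ⟨hc, by rw [hgd]; exact hv⟩]
      by_cases hm : m.contains k
      · rw [if_pos hm, if_neg (by tauto)]
      · rw [if_neg hm, if_pos ⟨hv, by simpa using hm⟩, hgd]
    · rw [if_neg (by rw [hgd]; tauto), if_neg (by tauto)]

-- keys of a merged dict: a subset of pvKeys, no duplicates
theorem pvMerge_keys (rows : List (List (String × String))) (gis : List Nat) :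
    (bMergeGroup rows gis).keys.Nodup ∧ ∀ k ∈ (bMergeGroup rows gis).keys, k ∈ pvKeys := by
  unfold bMergeGroup
  have step : ∀ (gis : List Nat) (d : PySem.Dict String String),
      d.keys.Nodup → (∀ k ∈ d.keys, k ∈ pvKeys) →
      (gis.foldl (fun merged idx =>
        let rowd := PySem.Dict.mk (rows.getD idx [])
        pvKeys.foldl (fun merged k =>
          match rowd.get? k with
          | some v => if v ≠ "" ∧ ¬ merged.contains k then merged.insert k v else merged
          | none => merged) merged) d).keys.Nodup ∧
      ∀ k ∈ (gis.foldl (fun merged idx =>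
        let rowd := PySem.Dict.mk (rows.getD idx [])
        pvKeys.foldl (fun merged k =>
          match rowd.get? k with
          | some v => if v ≠ "" ∧ ¬ merged.contains k then merged.insert k v else merged
          | none => merged) merged) d).keys, k ∈ pvKeys := by
    intro gis
    induction gis with
    | nil => intro d h1 h2; exact ⟨h1, h2⟩
    | cons idx rest ih =>
      intro d h1 h2
      simp only [List.foldl_cons]
      have inner : ∀ (ks : List String) (d : PySem.Dict String String),
            (∀ k ∈ ks, k ∈ pvKeys) →
            d.keys.Nodup → (∀ k ∈ d.keys, k ∈ pvKeys) →
            (ks.foldl (fun merged k =>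
              match (PySem.Dict.mk (rows.getD idx [])).get? k with
              | some v => if v ≠ "" ∧ ¬ merged.contains k then merged.insert k v else merged
              | none => merged) d).keys.Nodup ∧
            ∀ k ∈ (ks.foldl (fun merged k =>
              match (PySem.Dict.mk (rows.getD idx [])).get? k with
              | some v => if v ≠ "" ∧ ¬ merged.contains k then merged.insert k v else merged
              | none => merged) d).keys, k ∈ pvKeys := by
          intro ks
          induction ks with
          | nil => intro d ha hb hc; exact ⟨hb, hc⟩
          | cons k ks ihk =>
            intro d ha hb hc
            simp only [List.foldl_cons]
            have hstep : (match (PySem.Dict.mk (rows.getD idx [])).get? k with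
                | some v => if v ≠ "" ∧ ¬ d.contains k then d.insert k v else d
                | none => d).keys.Nodup ∧
                ∀ k' ∈ (match (PySem.Dict.mk (rows.getD idx [])).get? k with
                | some v => if v ≠ "" ∧ ¬ d.contains k then d.insert k v else d
                | none => d).keys, k' ∈ pvKeys := by
              match hget : (PySem.Dict.mk (rows.getD idx [])).get? k with
              | none => exact ⟨hb, hc⟩
              | some v =>
                show (if v ≠ "" ∧ ¬ d.contains k then d.insert k v else d).keys.Nodup ∧
                  ∀ k' ∈ (if v ≠ "" ∧ ¬ d.contains k then d.insert k v else d).keys, k' ∈ pvKeys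
                split_ifs with hcond
                · refine ⟨PySem.Dict.nodup_keys_insert _ _ _ hb, ?_⟩
                  intro k' hk'
                  rcases (PySem.Dict.mem_keys_insert _ _ _ _).mp hk' with h | hk'
                  · subst h
                    exact ha _ (by simp)
                  · exact hc k' hk'
                · exact ⟨hb, hc⟩
            exact ihk _ (fun k' hk' => ha k' (by simp [hk'])) hstep.1 hstep.2
      exact ih _ (inner pvKeys d (fun k hk => hk) h1 h2).1 (inner pvKeys d (fun k hk => hk) h1 h2).2
  exact step gis (PySem.Dict.mk []) (by simp [PySem.Dict.keys]) (by simp [PySem.Dict.keys])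

-- sum(1 for k in keys if k in merged) is the number of entries of merged
theorem pvCount_eq (d : PySem.Dict String String) (hnd : d.keys.Nodup)
    (hsub : ∀ k ∈ d.keys, k ∈ pvKeys) :
    pvKeys.countP (fun k => d.contains k) = d.items.length := by
  rw [List.countP_eq_length_filter]
  have hfe : pvKeys.filter (fun k => d.contains k) = pvKeys.filter (fun k => decide (k ∈ d.keys)) := by
    apply List.filter_congr
    intro k _
    rw [PySem.Dict.contains_eq_decide_mem_keys]
  rw [hfe]
  have hperm : (pvKeys.filter (fun k => decide (k ∈ d.keys))).Perm d.keys := by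
    rw [List.perm_ext_iff_of_nodup (List.Nodup.filter _ (by decide)) hnd]
    intro a
    simp only [List.mem_filter, decide_eq_true_eq]
    exact ⟨fun h => h.2, fun h => ⟨hsub a h, h⟩⟩
  rw [hperm.length_eq]
  show (d.items.map Prod.fst).length = d.items.length
  rw [List.length_map]
-- ===== final assembly =====
theorem pvOut_eq (rows : List (List (String × String))) (d e : PySem.Dict Nat (List Nat))
    (h : d.values = e.values) :
    d.items.foldl
      (fun fr g =>
        let merged := aMergeGroup rows g.2
        if 2 ≤ pvKeys.countP (fun k => merged.contains k) then fr ++ [merged.items] else fr)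
      [] =
    e.values.foldl
      (fun out g =>
        let merged := bMergeGroup rows g
        if 2 ≤ merged.items.length then out ++ [merged.items] else out)
      [] := by
  have h1 : d.items.foldl
      (fun fr g =>
        let merged := aMergeGroup rows g.2
        if 2 ≤ pvKeys.countP (fun k => merged.contains k) then fr ++ [merged.items] else fr)
      [] =
      d.values.foldl
      (fun fr gis =>
        let merged := aMergeGroup rows gis
        if 2 ≤ pvKeys.countP (fun k => merged.contains k) then fr ++ [merged.items] else fr)
      [] := by
    show _ = (d.items.map (·.2)).foldl _ []
    rw [List.foldl_map]
  rw [h1, h]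
  apply PySem.List.foldl_congr_mem
  intro acc gis _
  simp only []
  rw [pvMerge_eq rows gis]
  have hk := pvMerge_keys rows gis
  rw [pvCount_eq _ hk.1 hk.2]

theorem pvMain (rows : List (List (String × String))) :
    deduplicate_and_merge rows = deduplicate_and_merge_alt rows := by
  by_cases hrows : rows = []
  · subst hrows
    rfl
  · unfold deduplicate_and_merge deduplicate_and_merge_alt
    rw [if_neg hrows]
    obtain ⟨hg, hlab, hrel⟩ := pvConnect_bisim rows
    apply pvOut_eq
    -- values of A's groups dict = values of B's comps dict
    rw [ufGetGroups_eq _ hg]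
    have hcomps : bComps (bLabelPhase rows) =
        pvGroupFold (fun i => (bLabelPhase rows).getD i 0) (List.range rows.length)
          (PySem.Dict.mk []) := by
      show pvGroupFold (fun i => (bLabelPhase rows).getD i 0)
        (List.range (bLabelPhase rows).length) (PySem.Dict.mk []) = _
      rw [hlab]
    rw [hcomps]
    obtain ⟨ps', hps1, hps2, hR, hL⟩ :=
      pvGroup_corr (pvRoot (aConnect (aBuildIndices rows)
          (List.range rows.length, List.replicate rows.length 0)).1)
        (fun i => (bLabelPhase rows).getD i 0) hrel
        (List.range rows.length) (fun i hi => List.mem_range.mp hi) [] (by simp) (by simp)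
    simp only [List.map_nil] at hR hL
    rw [hR, hL]
    simp only [PySem.Dict.values, PySem.Dict.items, List.map_map]
    rfl

-- ===== VERDICT (by name: the statement is the Claim_ definition above) =====
theorem deduplicate_and_merge_spec : Claim_equal_deduplicate_and_merge := by
  intro rows _
  unfold Spec_deduplicate_and_merge
  exact pvMain rows
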